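-- pv_equiv track=rewrite | github.com/razer0003/philos | dual_philos_conversation.py | _clean_response_for_display
-- ===== SOURCE A (Python) =====
-- def _clean_response_for_display(response: str) -> str:
--     """Clean up response to remove internal monologue indicators"""
--     # Remove common internal monologue patterns
--     patterns_to_remove = [
--         "Internal monologue:",
--         "Meta-thoughts:",
--         "Thinking:",
--         "I think to myself:",
--         "Internally:",
--         "*thinking*",
--         "(thinking)",
--     ]
--
--     cleaned = response
--     for pattern in patterns_to_remove:
--         cleaned = cleaned.replace(pattern, "")
--
--     # Clean up extra whitespace
--     cleaned = " ".join(cleaned.split())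
--
--     return cleaned.strip()
-- ===== SOURCE B (Python) =====
-- def _remove_all(s: str, pattern: str) -> str:
--     # one explicit left-to-right scan; skip the pattern wherever it starts
--     out = []
--     i = 0
--     n = len(s)
--     m = len(pattern)
--     while i < n:
--         if s.startswith(pattern, i):
--             i += m
--         else:
--             out.append(s[i])
--             i += 1
--     return "".join(out)
--
--
-- def _normalize_ws(s: str) -> str:
--     # one-pass whitespace collapser: single spaces between words, none at ends
--     out = []
--     prev_space = True
--     for ch in s:
--         if ch.isspace():
--             prev_space = True
--         else:
--             if prev_space and out:
--                 out.append(" ")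
--             out.append(ch)
--             prev_space = False
--     return "".join(out)
--
--
-- def _clean_response_for_display(response: str) -> str:
--     patterns_to_remove = [
--         "Internal monologue:",
--         "Meta-thoughts:",
--         "Thinking:",
--         "I think to myself:",
--         "Internally:",
--         "*thinking*",
--         "(thinking)",
--     ]
--     cleaned = response
--     for pattern in patterns_to_remove:
--         cleaned = _remove_all(cleaned, pattern)
--     return _normalize_ws(cleaned)
-- ===== Notes on version B (the rewrite author's own statement) =====
-- stated objective: alternative
-- what changed: Replaces the seven str.replace library passes and the split/join/strip pipeline by explicit character-level loops: a hand-written left-to-right skip-scan per pattern and a single-pass whitespace collapser with a prev_space state flag, with no trailing strip.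
import Mathlib
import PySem

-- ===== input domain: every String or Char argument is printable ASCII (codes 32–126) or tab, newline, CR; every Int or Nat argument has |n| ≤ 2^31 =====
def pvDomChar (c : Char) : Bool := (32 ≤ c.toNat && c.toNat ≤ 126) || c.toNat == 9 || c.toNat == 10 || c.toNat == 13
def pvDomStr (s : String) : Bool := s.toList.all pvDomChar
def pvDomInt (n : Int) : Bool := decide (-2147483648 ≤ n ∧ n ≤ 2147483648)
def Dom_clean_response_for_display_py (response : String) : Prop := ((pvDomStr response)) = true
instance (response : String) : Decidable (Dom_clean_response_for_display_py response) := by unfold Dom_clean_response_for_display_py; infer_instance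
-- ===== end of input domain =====

-- B replaces the seven str.replace library passes and the split/join/strip pipeline by
-- explicit character-level scans (a per-pattern skip-scan and a one-pass whitespace
-- collapser); objective: alternative decomposition, same output everywhere.

-- ===== PORT A =====
def clean_response_for_display_py (response : String) : String :=
  let patterns_to_remove : List String :=
    ["Internal monologue:", "Meta-thoughts:", "Thinking:", "I think to myself:",
     "Internally:", "*thinking*", "(thinking)"]
  let cleaned := patterns_to_remove.foldl (fun c p => PySem.Str.replace c p "") response
  let cleaned := PySem.Str.join " " (PySem.Str.split₀ cleaned)
  PySem.Str.strip cleaned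

-- ===== PORT B =====
-- _remove_all: one explicit left-to-right scan, skipping the pattern wherever it starts.
-- (The `pat ≠ []` conjunct only makes the recursion total; every pattern passed is nonempty,
-- matching Python, where an empty pattern would not terminate either.)
def pvRemoveAll (pat : List Char) : List Char → List Char
  | [] => []
  | c :: t =>
    if pat.isPrefixOf (c :: t) ∧ pat ≠ [] then
      pvRemoveAll pat (List.drop (pat.length - 1) t)
    else c :: pvRemoveAll pat t
termination_by s => s.length
decreasing_by
  · simp only [List.length_drop, List.length_cons]; omega
  · simp only [List.length_cons]; omega

-- _normalize_ws: the for-loop over characters with its (out, prev_space) state.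
def pvNormGo : List Char → List Char → Bool → List Char
  | [], out, _ => out
  | ch :: rest, out, prev =>
    if PySem.Chars.isspace ch then pvNormGo rest out true
    else pvNormGo rest (out ++ (if prev ∧ out ≠ [] then [' ', ch] else [ch])) false

def clean_response_for_display_py_alt (response : String) : String :=
  let patterns_to_remove : List String :=
    ["Internal monologue:", "Meta-thoughts:", "Thinking:", "I think to myself:",
     "Internally:", "*thinking*", "(thinking)"]
  let cleaned := patterns_to_remove.foldl (fun c p => pvRemoveAll p.toList c) response.toList
  String.ofList (pvNormGo cleaned [] true)

-- ===== PRECONDITION & SPEC =====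
def Spec_clean_response_for_display_py (response : String) (out : String) : Prop := out = clean_response_for_display_py_alt response
instance (response : String) (out : String) : Decidable (Spec_clean_response_for_display_py response out) := by unfold Spec_clean_response_for_display_py; infer_instance

-- ===== CLAIM (what is proved, stated in full; the proofs are below) =====
def Claim_equal_clean_response_for_display_py : Prop := ∀ (response : String), Dom_clean_response_for_display_py response → Spec_clean_response_for_display_py response (clean_response_for_display_py response)

-- ===== LEMMAS AND PROOFS =====

-- ` `.join on a word list, in the closed form the proofs use.
def pvJ : List (List Char) → List Char
  | [] => []
  | w :: ws => w ++ ws.flatMap (fun v => ' ' :: v)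

theorem pvJ_eq_intercalate (ws : List (List Char)) : pvJ ws = List.intercalate [' '] ws := by
  induction ws with
  | nil => simp [pvJ, List.intercalate]
  | cons w ws ih =>
    cases ws with
    | nil => simp [pvJ, List.intercalate]
    | cons v t =>
      simp [pvJ, List.intercalate, List.intersperse] at ih ⊢
      simpa using ih

theorem pvJ_append_singleton (ws : List (List Char)) (w : List Char) :
    pvJ (ws ++ [w]) = pvJ ws ++ (if ws = [] then [] else [' ']) ++ w := by
  cases ws with
  | nil => simp [pvJ]
  | cons v t => simp [pvJ]

theorem pvJ_ne_nil (ws : List (List Char)) (hne : ws ≠ []) (h : ∀ w ∈ ws, w ≠ []) :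
    pvJ ws ≠ [] := by
  cases ws with
  | nil => exact absurd rfl hne
  | cons w t =>
    have hw := h w (by simp)
    simp [pvJ]
    intro hw'
    exact absurd hw' hw

-- the replace.go scanner with empty replacement IS the skip-scan
theorem go_spec (pat : List Char) (hp : pat ≠ []) :
    ∀ fuel (s acc : List Char), s.length ≤ fuel →
      PySem.Chars.replace.go pat [] fuel s acc = acc.reverse ++ pvRemoveAll pat s := by
  intro fuel
  induction fuel with
  | zero =>
    intro s acc hs
    have : s = [] := by cases s <;> simp_all
    subst this
    simp [PySem.Chars.replace.go, pvRemoveAll]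
  | succ n ih =>
    intro s acc hs
    cases s with
    | nil => simp [PySem.Chars.replace.go, pvRemoveAll]
    | cons c t =>
      have ht : t.length ≤ n := by simp at hs; omega
      by_cases hpre : pat.isPrefixOf (c :: t) = true
      · have hlen : 1 ≤ pat.length := by
          cases pat with
          | nil => exact absurd rfl hp
          | cons _ _ => simp
        have hdrop : List.drop pat.length (c :: t) = List.drop (pat.length - 1) t := by
          cases hpl : pat.length with
          | zero => omega
          | succ k => simp
        have hlt : (List.drop (pat.length - 1) t).length ≤ n := by
          have := List.length_drop (l := t) (i := pat.length - 1)
          omega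
        rw [PySem.Chars.replace.go]
        simp only [hpre, if_true, List.reverse_nil, List.nil_append]
        rw [hdrop, ih _ _ hlt]
        rw [pvRemoveAll]
        simp [hpre, hp]
      · rw [PySem.Chars.replace.go]
        simp only [hpre]
        rw [ih _ _ ht, pvRemoveAll]
        simp [hpre]

theorem removeAll_eq_replace (pat s : List Char) (hp : pat ≠ []) :
    PySem.Chars.replace s pat [] = pvRemoveAll pat s := by
  have hne : pat.isEmpty = false := by cases pat <;> simp_all
  rw [PySem.Chars.replace]
  simp only [hne, Bool.false_eq_true, if_false]
  simpa using go_spec pat hp s.length s [] le_rfl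

-- A's String-level replace fold, moved to char lists
theorem foldl_replace_toList (pats : List String) :
    ∀ r : String, (pats.foldl (fun c p => PySem.Str.replace c p "") r).toList
      = pats.foldl (fun c p => PySem.Chars.replace c p.toList []) r.toList := by
  induction pats with
  | nil => intro r; rfl
  | cons p t ih =>
    intro r
    have := ih (PySem.Str.replace r p "")
    simpa [PySem.Str.toList_replace] using this

theorem foldl_chars_eq (pats : List String) (h : ∀ p ∈ pats, p.toList ≠ []) :
    ∀ s : List Char, pats.foldl (fun c p => PySem.Chars.replace c p.toList []) s
      = pats.foldl (fun c p => pvRemoveAll p.toList c) s := by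
  induction pats with
  | nil => intro s; rfl
  | cons p t ih =>
    intro s
    have hp : p.toList ≠ [] := h p (by simp)
    simp only [List.foldl_cons]
    rw [removeAll_eq_replace _ _ hp]
    exact ih (fun q hq => h q (by simp [hq])) _

-- words produced by split₀.go are nonempty and whitespace-free
theorem split₀_go_words :
    ∀ (s cur : List Char) (acc : List (List Char)),
      (∀ w ∈ acc, w ≠ [] ∧ ∀ ch ∈ w, PySem.Chars.isspace ch = false) →
      (∀ ch ∈ cur, PySem.Chars.isspace ch = false) →
      ∀ w ∈ PySem.Chars.split₀.go s cur acc,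
        w ≠ [] ∧ ∀ ch ∈ w, PySem.Chars.isspace ch = false := by
  intro s
  induction s with
  | nil =>
    intro cur acc hacc hcur
    rw [PySem.Chars.split₀.go]
    by_cases hc : cur.isEmpty = true
    · simp only [hc, if_true]
      intro w hw
      exact hacc w (by simpa using hw)
    · simp only [hc, Bool.false_eq_true, if_false]
      intro w hw
      simp only [List.reverse_cons, List.mem_append, List.mem_reverse, List.mem_singleton] at hw
      rcases hw with hw | hw
      · exact hacc w hw
      · subst hw
        constructor
        · simp only [ne_eq, List.reverse_eq_nil_iff]
          intro h; simp [h] at hc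
        · intro ch hch
          exact hcur ch (by simpa using hch)
  | cons c t ih =>
    intro cur acc hacc hcur
    rw [PySem.Chars.split₀.go]
    by_cases hsp : PySem.Chars.isspace c = true
    · simp only [hsp, if_true]
      by_cases hc : cur.isEmpty = true
      · simp only [hc, if_true]
        exact ih [] acc hacc (by simp)
      · simp only [hc, Bool.false_eq_true, if_false]
        refine ih [] (cur.reverse :: acc) ?_ (by simp)
        intro w hw
        simp only [List.mem_cons] at hw
        rcases hw with hw | hw
        · subst hw
          constructor
          · simp only [ne_eq, List.reverse_eq_nil_iff]
            intro h; simp [h] at hc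
          · intro ch hch; exact hcur ch (by simpa using hch)
        · exact hacc w hw
    · simp only [hsp, Bool.false_eq_true, if_false]
      refine ih (c :: cur) acc hacc ?_
      intro ch hch
      simp only [List.mem_cons] at hch
      rcases hch with hch | hch
      · subst hch; simpa using hsp
      · exact hcur ch hch

-- the one-pass collapser simulates split₀.go
theorem pvNorm_sim :
    ∀ (s cur : List Char) (acc : List (List Char)),
      (∀ w ∈ acc, w ≠ []) →
      (pvNormGo s (pvJ acc.reverse) true = pvJ (PySem.Chars.split₀.go s [] acc))
      ∧ (cur ≠ [] →
          pvNormGo s (pvJ (acc.reverse ++ [cur.reverse])) false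
            = pvJ (PySem.Chars.split₀.go s cur acc)) := by
  intro s
  induction s with
  | nil =>
    intro cur acc hacc
    constructor
    · rw [PySem.Chars.split₀.go]; simp [pvNormGo]
    · intro hcur
      rw [PySem.Chars.split₀.go]
      have : cur.isEmpty = false := by cases cur <;> simp_all
      simp [pvNormGo, this]
  | cons c t ih =>
    intro cur acc hacc
    constructor
    · -- between-words state (prev_space = true, cur = [])
      rw [PySem.Chars.split₀.go]
      by_cases hsp : PySem.Chars.isspace c = true
      · simp only [hsp, if_true, List.isEmpty_nil]
        rw [pvNormGo]
        simp only [hsp, if_true]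
        exact (ih [] acc hacc).1
      · simp only [hsp, Bool.false_eq_true, if_false]
        rw [pvNormGo]
        simp only [hsp, Bool.false_eq_true, if_false]
        by_cases hacc0 : acc = []
        · subst hacc0
          have := (ih [c] [] (by simp)).2 (by simp)
          simpa [pvJ] using this
        · have h1 : acc.reverse ≠ [] := by simpa using hacc0
          have h2 : pvJ acc.reverse ≠ [] :=
            pvJ_ne_nil _ h1 (fun w hw => hacc w (by simpa using hw))
          have := (ih [c] acc hacc).2 (by simp)
          simp only [List.reverse_cons, List.reverse_nil, List.nil_append,
            pvJ_append_singleton, h1, if_false] at this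
          simpa [h2, List.append_assoc] using this
    · -- inside-word state (prev_space = false, cur ≠ [])
      intro hcur
      rw [PySem.Chars.split₀.go]
      have hce : cur.isEmpty = false := by cases cur <;> simp_all
      by_cases hsp : PySem.Chars.isspace c = true
      · simp only [hsp, if_true, hce, Bool.false_eq_true, if_false]
        rw [pvNormGo]
        simp only [hsp, if_true]
        have := (ih [] (cur.reverse :: acc) ?_).1
        · simpa using this
        · intro w hw
          simp only [List.mem_cons] at hw
          rcases hw with hw | hw
          · subst hw; simpa using hcur
          · exact hacc w hw
      · simp only [hsp, Bool.false_eq_true, if_false]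
        rw [pvNormGo]
        simp only [hsp, Bool.false_eq_true, if_false]
        have := (ih (c :: cur) acc hacc).2 (by simp)
        simp only [List.reverse_cons] at this
        simp only [false_and, if_false]
        rw [show pvJ (acc.reverse ++ [cur.reverse]) ++ [c]
              = pvJ (acc.reverse ++ [cur.reverse ++ [c]]) by
            rw [pvJ_append_singleton, pvJ_append_singleton]; simp]
        exact this

theorem pvNorm_eq_join (s : List Char) :
    pvNormGo s [] true = pvJ (PySem.Chars.split₀ s) := by
  have := (pvNorm_sim s [] [] (by simp)).1
  simpa [pvJ, PySem.Chars.split₀] using this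

-- stripping a space-joined list of nonempty whitespace-free words changes nothing
theorem dropWhile_pvJ (ws : List (List Char))
    (h : ∀ w ∈ ws, w ≠ [] ∧ ∀ ch ∈ w, PySem.Chars.isspace ch = false) :
    List.dropWhile PySem.Chars.isspace (pvJ ws) = pvJ ws := by
  cases ws with
  | nil => simp [pvJ]
  | cons w t =>
    obtain ⟨hne, hns⟩ := h w (by simp)
    cases w with
    | nil => exact absurd rfl hne
    | cons ch w' =>
      have : PySem.Chars.isspace ch = false := hns ch (by simp)
      simp [pvJ, this]

theorem pvJ_reverse (ws : List (List Char)) :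
    (pvJ ws).reverse = pvJ ((ws.map List.reverse).reverse) := by
  induction ws with
  | nil => simp [pvJ]
  | cons w t ih =>
    cases t with
    | nil => simp [pvJ]
    | cons v t' =>
      have hcc : pvJ (w :: v :: t') = w ++ ' ' :: pvJ (v :: t') := by simp [pvJ]
      rw [hcc]
      have hne : ((v :: t').map List.reverse).reverse ≠ [] := by simp
      calc (w ++ ' ' :: pvJ (v :: t')).reverse
          = (pvJ (v :: t')).reverse ++ [' '] ++ w.reverse := by simp
        _ = pvJ (((v :: t').map List.reverse).reverse) ++ [' '] ++ w.reverse := by rw [ih]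
        _ = pvJ (((v :: t').map List.reverse).reverse ++ [w.reverse]) := by
            rw [pvJ_append_singleton]; simp
        _ = pvJ (((w :: v :: t').map List.reverse).reverse) := by simp

theorem strip_pvJ (ws : List (List Char))
    (h : ∀ w ∈ ws, w ≠ [] ∧ ∀ ch ∈ w, PySem.Chars.isspace ch = false) :
    PySem.Chars.strip (pvJ ws) = pvJ ws := by
  have hrev : ∀ w ∈ (ws.map List.reverse).reverse,
      w ≠ [] ∧ ∀ ch ∈ w, PySem.Chars.isspace ch = false := by
    intro w hw
    simp only [List.mem_reverse, List.mem_map] at hw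
    obtain ⟨v, hv, rfl⟩ := hw
    obtain ⟨h1, h2⟩ := h v hv
    exact ⟨by simpa using h1, fun ch hch => h2 ch (by simpa using hch)⟩
  rw [PySem.Chars.strip, PySem.Chars.lstrip, PySem.Chars.rstrip]
  rw [dropWhile_pvJ ws h, pvJ_reverse, dropWhile_pvJ _ hrev, ← pvJ_reverse]
  simp

-- ===== VERDICT (by name: the statement is the Claim_ definition above) =====
theorem clean_response_for_display_py_spec : Claim_equal_clean_response_for_display_py := by
  intro response _
  unfold Spec_clean_response_for_display_py
  unfold clean_response_for_display_py clean_response_for_display_py_alt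
  apply String.toList_inj.mp
  simp only [PySem.Str.toList_strip, PySem.Str.toList_join, PySem.Str.split₀_map_toList,
    String.toList_ofList]
  rw [foldl_replace_toList]
  rw [foldl_chars_eq _ (by intro p hp; fin_cases hp <;> decide)]
  set L := [("Internal monologue:" : String), "Meta-thoughts:", "Thinking:", "I think to myself:",
     "Internally:", "*thinking*", "(thinking)"].foldl (fun c p => pvRemoveAll p.toList c) response.toList with hL
  have hwords := split₀_go_words L [] [] (by simp) (by simp)
  have hjoin : PySem.Chars.join (" ".toList) (PySem.Chars.split₀ L) = pvJ (PySem.Chars.split₀ L) := by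
    rw [PySem.Chars.join, show (" " : String).toList = [' '] from rfl, ← pvJ_eq_intercalate]
  rw [hjoin]
  rw [strip_pvJ _ (by intro w hw; exact hwords w (by simpa [PySem.Chars.split₀] using hw))]
  rw [pvNorm_eq_join]
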